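-- pv_equiv track=rewrite | github.com/SuslickSLS/-SoftwareEngineering | code/lab5_5.py | ultraSet
-- ===== SOURCE A (Python) =====
-- def ultraSet(numbers):
--     newNumbers = numbers
--     for i in range(len(newNumbers)):
--         count = numbers[i:].count(numbers[i])
--         if(count == 1):
--             newNumbers[i] = numbers[i]
--         else:
--             newNumbers[i] = str(numbers[i])*count
--
--
--     return newNumbers
-- ===== SOURCE B (Python) =====
-- def ultraSet(numbers):
--     # One reversed pass with a running count per value: O(n) instead of A's O(n^2).
--     # Equivalence is about the return value: A mutates its argument in place, B does not.
--     counts = {}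
--     out = []
--     for s in reversed(numbers):
--         c = counts.get(s, 0) + 1
--         counts[s] = c
--         out.append(s * c)
--     out.reverse()
--     return out
-- ===== Notes on version B (the rewrite author's own statement) =====
-- stated objective: faster
-- what changed: Replaced the per-index suffix slice-and-count with a single reversed pass maintaining a dict of running occurrence counts.
import Mathlib
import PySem

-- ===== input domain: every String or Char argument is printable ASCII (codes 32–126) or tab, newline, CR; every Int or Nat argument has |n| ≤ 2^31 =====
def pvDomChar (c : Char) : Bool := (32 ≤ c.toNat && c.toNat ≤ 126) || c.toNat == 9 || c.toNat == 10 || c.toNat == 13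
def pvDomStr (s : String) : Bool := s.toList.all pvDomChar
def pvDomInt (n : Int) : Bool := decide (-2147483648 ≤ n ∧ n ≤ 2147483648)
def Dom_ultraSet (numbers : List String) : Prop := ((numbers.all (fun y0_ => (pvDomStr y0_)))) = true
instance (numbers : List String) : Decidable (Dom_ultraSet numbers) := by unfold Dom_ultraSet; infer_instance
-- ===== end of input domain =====

-- B replaces A's per-index suffix slice-and-count with one reversed pass keeping a dict of
-- running counts. The equivalence is about the RETURN value: Python A mutates its argument
-- in place, B does not.

-- shared primitive: Python's `s * n` on a string (n ≤ 0 gives "")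
def strMulAux (s : String) : Nat → String
  | 0 => ""
  | k + 1 => s ++ strMulAux s k

def strMul (s : String) (n : Int) : String := strMulAux s n.toNat

-- ===== PORT A =====
-- the body of A's for-loop over i in range(len(newNumbers))
def ultraSetStep (newNumbers : List String) (i : Nat) : List String :=
  let count := PySem.List.count
    (PySem.List.slice newNumbers (some (i : Int)) none)
    (PySem.List.pyGetD newNumbers (i : Int) "")
  if count == 1 then
    PySem.List.pySetD newNumbers (i : Int) (PySem.List.pyGetD newNumbers (i : Int) "")
  else
    PySem.List.pySetD newNumbers (i : Int)
      (strMul (PySem.List.pyGetD newNumbers (i : Int) "") (count : Int))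

def ultraSet (numbers : List String) : List String :=
  (List.range numbers.length).foldl ultraSetStep numbers

-- ===== PORT B =====
-- the body of B's for-loop over s in reversed(numbers); state = (out, counts)
def ultraSetAltStep (st : List String × PySem.Dict String Int) (s : String) :
    List String × PySem.Dict String Int :=
  let c := st.2.getD s 0 + 1
  (st.1 ++ [strMul s c], st.2.insert s c)

def ultraSet_alt (numbers : List String) : List String :=
  (numbers.reverse.foldl ultraSetAltStep ([], PySem.Dict.empty)).1.reverse

-- ===== PRECONDITION & SPEC =====
def Spec_ultraSet (numbers : List String) (out : List String) : Prop := out = ultraSet_alt numbers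
instance (numbers : List String) (out : List String) : Decidable (Spec_ultraSet numbers out) := by unfold Spec_ultraSet; infer_instance

-- ===== CLAIM (what is proved, stated in full; the proofs are below) =====
def Claim_equal_ultraSet : Prop := ∀ (numbers : List String), Dom_ultraSet numbers → Spec_ultraSet numbers (ultraSet numbers)

-- ===== LEMMAS AND PROOFS =====

-- common characterisation: each element times the count of its occurrences in its suffix,
-- with the dict offset d used by B's invariant
def suffSpecD : List String → PySem.Dict String Int → List String
  | [], _ => []
  | s :: rest, d => strMul s (d.getD s 0 + (rest.count s : Int) + 1) :: suffSpecD rest d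

theorem strMul_one (s : String) : strMul s 1 = s := by
  show s ++ "" = s
  simp

theorem set_len_append (pre rest : List String) (s v : String) :
    (pre ++ s :: rest).set pre.length v = pre ++ v :: rest := by
  induction pre with
  | nil => rfl
  | cons a t ih => simp [ih]

theorem ultraSet_loop (suf pre : List String) :
    (List.range' pre.length suf.length).foldl ultraSetStep (pre ++ suf)
      = pre ++ suffSpecD suf PySem.Dict.empty := by
  induction suf generalizing pre with
  | nil => simp [suffSpecD]
  | cons s rest ih =>
    rw [List.length_cons, List.range'_succ, List.foldl_cons]
    have hget : PySem.List.pyGetD (pre ++ s :: rest) (pre.length : Int) "" = s := by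
      rw [PySem.List.pyGetD_natCast]
      simp [List.getD]
    have hslice : PySem.List.slice (pre ++ s :: rest) (some (pre.length : Int)) none
        = s :: rest := by
      rw [PySem.List.slice_from_natCast]
      simp
    have hcount : PySem.List.count (s :: rest) s = rest.count s + 1 := by
      simp [PySem.List.count]
    have hstep : ultraSetStep (pre ++ s :: rest) pre.length
        = (pre ++ [strMul s ((rest.count s : Int) + 1)]) ++ rest := by
      unfold ultraSetStep
      simp only [hget, hslice, hcount]
      by_cases h1 : rest.count s + 1 = 1
      · have h0 : rest.count s = 0 := by omega
        simp [h0, PySem.List.pySetD_natCast, strMul_one]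
      · have hb : (rest.count s + 1 == 1) = false := by
          simp only [beq_eq_false_iff_ne, ne_eq]
          omega
        simp only [hb, Bool.false_eq_true, if_false, PySem.List.pySetD_natCast,
          set_len_append]
        simp [strMul]
    rw [hstep]
    have hlen : pre.length + 1 = (pre ++ [strMul s ((rest.count s : Int) + 1)]).length := by
      simp
    rw [hlen, ih]
    simp [suffSpecD]

-- B's reversed fold as a foldr: output so far plus running counts in the dict
theorem alt_loop (l : List String) (out0 : List String) (d : PySem.Dict String Int) :
    (l.foldr (fun s st => ultraSetAltStep st s) (out0, d)).1
        = out0 ++ (suffSpecD l d).reverse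
    ∧ ∀ t, (l.foldr (fun s st => ultraSetAltStep st s) (out0, d)).2.getD t 0
        = d.getD t 0 + l.count t := by
  induction l with
  | nil => simp [suffSpecD]
  | cons s rest ih =>
    obtain ⟨ih1, ih2⟩ := ih
    rcases hr : List.foldr (fun s st => ultraSetAltStep st s) (out0, d) rest with ⟨o, dR⟩
    rw [hr] at ih1 ih2
    simp only at ih1 ih2
    constructor
    · rw [List.foldr_cons, hr]
      simp only [ultraSetAltStep, ih1, ih2 s, suffSpecD, List.reverse_cons,
        List.append_assoc]
    · intro t
      rw [List.foldr_cons, hr]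
      simp only [ultraSetAltStep, PySem.Dict.getD_insert]
      by_cases ht : t = s
      · subst ht
        rw [if_pos rfl, ih2 t, List.count_cons]
        simp
        ring
      · rw [if_neg ht, ih2 t, List.count_cons]
        have hb : (t == s) = false := by simp [ht]
        simp [Ne.symm ht]

theorem ultraSet_alt_eq (numbers : List String) :
    ultraSet_alt numbers = suffSpecD numbers PySem.Dict.empty := by
  unfold ultraSet_alt
  rw [List.foldl_reverse]
  rw [(alt_loop numbers [] PySem.Dict.empty).1]
  simp

-- ===== VERDICT (by name: the statement is the Claim_ definition above) =====
theorem ultraSet_spec : Claim_equal_ultraSet := by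
  intro numbers _
  show ultraSet numbers = ultraSet_alt numbers
  rw [ultraSet_alt_eq]
  have h := ultraSet_loop numbers []
  simpa [ultraSet, List.range_eq_range'] using h
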